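-- pv_equiv track=rewrite | github.com/tejarshaarigila/bioinformatics-sequence-alignment | AlignGlobal.py | initialize_matrices
-- ===== SOURCE A (Python) =====
-- def initialize_matrices(seq1, seq2, gap):
--     n, m = len(seq1), len(seq2)
--     score_matrix = [[0 for _ in range(m + 1)] for _ in range(n + 1)]
--     traceback = [["" for _ in range(m + 1)] for _ in range(n + 1)]
--     for i in range(1, n + 1):
--         score_matrix[i][0] = i * gap
--         traceback[i][0] = "U"
--     for j in range(1, m + 1):
--         score_matrix[0][j] = j * gap
--         traceback[0][j] = "L"
--     traceback[0][0] = "0"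
--     return score_matrix, traceback
-- ===== SOURCE B (Python) =====
-- def _transpose(cols):
--     return [[col[i] for col in cols] for i in range(len(cols[0]))]
--
--
-- def initialize_matrices(seq1, seq2, gap):
--     n, m = len(seq1), len(seq2)
--     score_cols = [[i * gap for i in range(n + 1)]] + \
--         [[j * gap] + [0] * n for j in range(1, m + 1)]
--     tb_cols = [["0"] + ["U"] * n] + \
--         [["L"] + [""] * n for _ in range(1, m + 1)]
--     return _transpose(score_cols), _transpose(tb_cols)
-- ===== Notes on version B (the rewrite author's own statement) =====
-- stated objective: alternative
-- what changed: B builds both matrices column-major (first column from seq1's border, then one short column per j) and obtains the row-major result by an explicit index-driven transpose, instead of A's allocate-zero-rows-then-walk-the-two-borders in row-major order.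
import Mathlib
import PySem

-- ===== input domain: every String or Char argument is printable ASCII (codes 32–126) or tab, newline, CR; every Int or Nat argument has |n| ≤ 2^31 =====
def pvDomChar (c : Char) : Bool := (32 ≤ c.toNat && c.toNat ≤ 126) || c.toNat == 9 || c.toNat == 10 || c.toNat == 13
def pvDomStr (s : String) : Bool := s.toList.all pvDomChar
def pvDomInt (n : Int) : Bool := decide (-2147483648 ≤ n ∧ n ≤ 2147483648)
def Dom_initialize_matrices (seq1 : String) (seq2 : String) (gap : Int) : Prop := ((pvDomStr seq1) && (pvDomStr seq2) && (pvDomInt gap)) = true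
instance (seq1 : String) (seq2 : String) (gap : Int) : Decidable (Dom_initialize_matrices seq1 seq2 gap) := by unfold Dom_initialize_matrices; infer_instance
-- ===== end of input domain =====

-- B builds both matrices column-major (one column per j) and transposes with an explicit
-- index-driven transpose, replacing A's allocate-zero-rows-then-write-two-borders; objective: alternative, same cost.


-- ===== PORT A =====
def initialize_matrices (seq1 : String) (seq2 : String) (gap : Int) : List (List Int) × List (List String) :=
  let n := PySem.Str.len seq1
  let m := PySem.Str.len seq2
  let score_matrix : List (List Int) :=
    (PySem.List.pyRange 0 (n + 1) 1).map (fun _ => (PySem.List.pyRange 0 (m + 1) 1).map (fun _ => (0 : Int)))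
  let traceback : List (List String) :=
    (PySem.List.pyRange 0 (n + 1) 1).map (fun _ => (PySem.List.pyRange 0 (m + 1) 1).map (fun _ => ("" : String)))
  -- for i in range(1, n+1): score_matrix[i][0] = i*gap; traceback[i][0] = "U"
  let st := (PySem.List.pyRange 1 (n + 1) 1).foldl
    (fun (p : List (List Int) × List (List String)) i =>
      (PySem.List.pySetD p.1 i (PySem.List.pySetD (PySem.List.pyGetD p.1 i []) 0 (i * gap)),
       PySem.List.pySetD p.2 i (PySem.List.pySetD (PySem.List.pyGetD p.2 i []) 0 "U")))
    (score_matrix, traceback)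
  -- for j in range(1, m+1): score_matrix[0][j] = j*gap; traceback[0][j] = "L"
  let st2 := (PySem.List.pyRange 1 (m + 1) 1).foldl
    (fun (p : List (List Int) × List (List String)) j =>
      (PySem.List.pySetD p.1 0 (PySem.List.pySetD (PySem.List.pyGetD p.1 0 []) j (j * gap)),
       PySem.List.pySetD p.2 0 (PySem.List.pySetD (PySem.List.pyGetD p.2 0 []) j "L")))
    st
  -- traceback[0][0] = "0"
  (st2.1, PySem.List.pySetD st2.2 0 (PySem.List.pySetD (PySem.List.pyGetD st2.2 0 []) 0 "0"))

-- ===== PORT B =====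
-- _transpose(cols) = [[col[i] for col in cols] for i in range(len(cols[0]))]
-- (every col[i] access is in range on B's rectangular columns, so the default d is never used)
def pvTransposeB {α : Type} (d : α) (cols : List (List α)) : List (List α) :=
  (PySem.List.pyRange 0 ((PySem.List.pyGetD cols 0 []).length : Int) 1).map
    (fun i => cols.map (fun col => PySem.List.pyGetD col i d))

def initialize_matrices_alt (seq1 : String) (seq2 : String) (gap : Int) : List (List Int) × List (List String) :=
  let n := PySem.Str.len seq1
  let m := PySem.Str.len seq2
  let score_cols : List (List Int) :=
    ((PySem.List.pyRange 0 (n + 1) 1).map (fun i => i * gap)) ::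
      (PySem.List.pyRange 1 (m + 1) 1).map (fun j => j * gap :: List.replicate n.toNat 0)
  let tb_cols : List (List String) :=
    ("0" :: List.replicate n.toNat "U") ::
      (PySem.List.pyRange 1 (m + 1) 1).map (fun _ => "L" :: List.replicate n.toNat "")
  (pvTransposeB 0 score_cols, pvTransposeB "" tb_cols)

-- ===== PRECONDITION & SPEC =====
def Spec_initialize_matrices (seq1 : String) (seq2 : String) (gap : Int) (out : List (List Int) × List (List String)) : Prop := out = initialize_matrices_alt seq1 seq2 gap
instance (seq1 : String) (seq2 : String) (gap : Int) (out : List (List Int) × List (List String)) : Decidable (Spec_initialize_matrices seq1 seq2 gap out) := by unfold Spec_initialize_matrices; infer_instance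

-- ===== CLAIM (what is proved, stated in full; the proofs are below) =====
def Claim_equal_initialize_matrices : Prop := ∀ (seq1 : String) (seq2 : String) (gap : Int), Dom_initialize_matrices seq1 seq2 gap → Spec_initialize_matrices seq1 seq2 gap (initialize_matrices seq1 seq2 gap)

-- ===== LEMMAS AND PROOFS =====

-- spine of A's border-writing loops: write g c x at each position, counting from c
def pvWriteRows {α : Type} (g : Int → α → α) : Nat → List α → List α
  | _, [] => []
  | c, x :: xs => g (c : Int) x :: pvWriteRows g (c + 1) xs

-- a fold over range(pre.length, pre.length + l.length) that reads and rewrites cell i in place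
lemma pv_fold_set {α : Type} (g : Int → α → α) (d : α) :
    ∀ (l pre : List α),
      (PySem.List.pyRange (pre.length : Int) ((pre.length : Int) + l.length) 1).foldl
        (fun acc i => PySem.List.pySetD acc i (g i (PySem.List.pyGetD acc i d))) (pre ++ l)
      = pre ++ pvWriteRows g pre.length l := by
  intro l
  induction l with
  | nil =>
      intro pre
      rw [PySem.List.pyRange_one_eq_nil (by simp)]
      simp [pvWriteRows]
  | cons x xs ih =>
      intro pre
      rw [PySem.List.pyRange_one_cons (by push_cast [List.length_cons]; omega)]
      simp only [List.foldl_cons]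
      have hget : PySem.List.pyGetD (pre ++ x :: xs) (pre.length : Int) d = x := by
        rw [PySem.List.pyGetD_natCast]
        simp [List.getD_eq_getElem?_getD]
      have hset : PySem.List.pySetD (pre ++ x :: xs) (pre.length : Int) (g (pre.length : Int) x)
          = (pre ++ [g (pre.length : Int) x]) ++ xs := by
        rw [PySem.List.pySetD_natCast]
        rw [List.set_append_right _ _ (le_refl _)]
        simp
      rw [hget, hset]
      have h2 := ih (pre ++ [g (pre.length : Int) x])
      have hlen : ((pre ++ [g (pre.length : Int) x]).length : Int) = (pre.length : Int) + 1 := by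
        simp
      rw [hlen] at h2
      have hlen2 : ((pre.length : Int) + 1 + (xs.length : Int)) = (pre.length : Int) + ((x :: xs).length : Int) := by
        simp; omega
      rw [hlen2] at h2
      rw [h2]
      simp [pvWriteRows]

lemma pvWriteRows_replicate {α : Type} (g : Int → α → α) (z : α) :
    ∀ (k c : Nat), pvWriteRows g c (List.replicate k z) = (List.range k).map (fun t => g ((c + t : Nat) : Int) z) := by
  intro k
  induction k with
  | zero => intro c; simp [pvWriteRows]
  | succ k ih =>
      intro c
      rw [List.replicate_succ, List.range_succ_eq_map]
      simp only [pvWriteRows, List.map_cons, List.map_map]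
      refine congrArg₂ _ (by simp) ?_
      rw [ih (c + 1)]
      simp [Function.comp]
      intro a _
      congr 1
      ring

-- a fold that only reads and rewrites cell 0 acts on the head alone
lemma pv_fold_head {α : Type} (f : α → Int → α) (d : α) :
    ∀ (L : List Int) (h : α) (t : List α),
      L.foldl (fun acc j => PySem.List.pySetD acc 0 (f (PySem.List.pyGetD acc 0 d) j)) (h :: t)
      = L.foldl f h :: t := by
  intro L
  induction L with
  | nil => intro h t; rfl
  | cons x xs ih =>
      intro h t
      simp only [List.foldl_cons, PySem.List.pyGetD_zero_cons]
      rw [show PySem.List.pySetD (h :: t) 0 (f h x) = f h x :: t by simp [pysem]]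
      exact ih _ t

-- pv_fold_set over a singleton prefix, with the concrete range(1, N+1) endpoints
lemma pv_fold_set1 {α : Type} (g : Int → α → α) (d : α) (N : Nat) (z0 z : α) :
    (PySem.List.pyRange 1 ((N : Int) + 1) 1).foldl
        (fun acc i => PySem.List.pySetD acc i (g i (PySem.List.pyGetD acc i d))) (z0 :: List.replicate N z)
      = z0 :: (List.range N).map (fun t => g ((1 + t : Nat) : Int) z) := by
  have h := pv_fold_set g d (List.replicate N z) [z0]
  simp only [List.length_cons, List.length_nil, List.length_replicate, Nat.cast_one,
    List.singleton_append, zero_add] at h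
  rw [show (1 : Int) + (N : Int) = (N : Int) + 1 by ring] at h
  rw [h, pvWriteRows_replicate]

-- A's whole computation, over the two lengths, in explicit row form
lemma pv_main (N M : Nat) (gap : Int) :
    (let n : Int := (N : Int)
     let m : Int := (M : Int)
     let score_matrix : List (List Int) :=
       (PySem.List.pyRange 0 (n + 1) 1).map (fun _ => (PySem.List.pyRange 0 (m + 1) 1).map (fun _ => (0 : Int)))
     let traceback : List (List String) :=
       (PySem.List.pyRange 0 (n + 1) 1).map (fun _ => (PySem.List.pyRange 0 (m + 1) 1).map (fun _ => ("" : String)))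
     let st := (PySem.List.pyRange 1 (n + 1) 1).foldl
       (fun (p : List (List Int) × List (List String)) i =>
         (PySem.List.pySetD p.1 i (PySem.List.pySetD (PySem.List.pyGetD p.1 i []) 0 (i * gap)),
          PySem.List.pySetD p.2 i (PySem.List.pySetD (PySem.List.pyGetD p.2 i []) 0 "U")))
       (score_matrix, traceback)
     let st2 := (PySem.List.pyRange 1 (m + 1) 1).foldl
       (fun (p : List (List Int) × List (List String)) j =>
         (PySem.List.pySetD p.1 0 (PySem.List.pySetD (PySem.List.pyGetD p.1 0 []) j (j * gap)),
          PySem.List.pySetD p.2 0 (PySem.List.pySetD (PySem.List.pyGetD p.2 0 []) j "L")))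
       st
     (st2.1, PySem.List.pySetD st2.2 0 (PySem.List.pySetD (PySem.List.pyGetD st2.2 0 []) 0 "0")))
    =
    (let n : Int := (N : Int)
     let m : Int := (M : Int)
     (((PySem.List.pyRange 0 (m + 1) 1).map (fun j => j * gap)) ::
        (PySem.List.pyRange 1 (n + 1) 1).map (fun i => i * gap :: List.replicate m.toNat 0),
      ("0" :: List.replicate m.toNat "L") ::
        (PySem.List.pyRange 1 (n + 1) 1).map (fun _ => "U" :: List.replicate m.toNat ""))) := by
  simp only []
  have hconst : ∀ {β : Type} (b : β) (k : Nat),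
      (PySem.List.pyRange 0 ((k : Int) + 1) 1).map (fun _ => b) = b :: List.replicate k b := by
    intro β b k
    rw [List.map_const', PySem.List.length_pyRange_one]
    rw [show (((k : Int) + 1 - 0).toNat) = k + 1 by omega, List.replicate_succ]
  simp only [hconst]
  rw [PySem.List.foldl_prod_mk
        (fun acc i => PySem.List.pySetD acc i (PySem.List.pySetD (PySem.List.pyGetD acc i []) 0 (i * gap)))
        (fun acc i => PySem.List.pySetD acc i (PySem.List.pySetD (PySem.List.pyGetD acc i []) 0 "U"))
        (PySem.List.pyRange 1 ((N : Int) + 1) 1)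
        ((0 :: List.replicate M 0) :: List.replicate N (0 :: List.replicate M 0))
        (("" :: List.replicate M "") :: List.replicate N ("" :: List.replicate M ""))]
  rw [pv_fold_set1 (fun i row => PySem.List.pySetD row 0 (i * gap)) ([] : List Int) N _ _]
  rw [pv_fold_set1 (fun i row => PySem.List.pySetD row 0 "U") ([] : List String) N _ _]
  rw [PySem.List.foldl_prod_mk
        (fun acc j => PySem.List.pySetD acc 0 (PySem.List.pySetD (PySem.List.pyGetD acc 0 []) j (j * gap)))
        (fun acc j => PySem.List.pySetD acc 0 (PySem.List.pySetD (PySem.List.pyGetD acc 0 []) j "L"))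
        (PySem.List.pyRange 1 ((M : Int) + 1) 1)
        ((0 :: List.replicate M 0) ::
          List.map (fun t => PySem.List.pySetD (0 :: List.replicate M 0) 0 ((((1 + t : Nat)) : Int) * gap)) (List.range N))
        (("" :: List.replicate M "") ::
          List.map (fun t => PySem.List.pySetD ("" :: List.replicate M "") 0 "U") (List.range N))]
  rw [pv_fold_head (fun h j => PySem.List.pySetD h j (j * gap)) ([] : List Int) _ _ _]
  rw [pv_fold_head (fun h j => PySem.List.pySetD h j "L") ([] : List String) _ _ _]
  rw [pv_fold_set1 (fun j _ => j * gap) (0 : Int) M 0 0]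
  rw [pv_fold_set1 (fun j _ => "L") ("" : String) M "" ""]
  have hset0 : ∀ {β : Type} (h v : β) (t : List β), PySem.List.pySetD (h :: t) 0 v = v :: t := by
    intro β h v t; simp [pysem]
  simp only [hset0, PySem.List.pyGetD_zero_cons, List.map_const', List.length_range, Int.toNat_natCast]
  rw [PySem.List.pyRange_one 1 ((N : Int) + 1), PySem.List.pyRange_one 0 ((M : Int) + 1)]
  rw [show (((N : Int) + 1 - 1).toNat) = N by omega, show (((M : Int) + 1 - 0).toNat) = M + 1 by omega]
  simp only [List.map_map, List.range_succ_eq_map, List.map_cons, Prod.mk.injEq, List.cons_eq_cons]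
  refine ⟨⟨⟨by norm_num, List.map_congr_left ?_⟩, List.map_congr_left ?_⟩, trivial, by simp⟩
  · intro t _
    simp only [Function.comp_apply]
    push_cast
    ring
  · intro t _
    simp only [Function.comp_apply, List.cons_eq_cons]
    exact ⟨by push_cast; ring, trivial⟩

-- indexing a head-plus-padding column at a positive in-range index yields the padding
lemma pv_get_cons_replicate {α : Type} (d h z : α) (N : Nat) (i : Int)
    (h1 : 1 ≤ i) (h2 : i < (N : Int) + 1) :
    PySem.List.pyGetD (h :: List.replicate N z) i d = z := by
  obtain ⟨k, hk, hkN⟩ : ∃ k : Nat, i = ((k + 1 : Nat) : Int) ∧ k < N :=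
    ⟨(i - 1).toNat, by omega, by omega⟩
  rw [hk, PySem.List.pyGetD_natCast]
  simp [List.getD_eq_getElem?_getD, hkN]

-- transpose of a matrix given as (first column c0 of length N+1) :: (head-plus-padding columns)
lemma pv_transpose_gen {α : Type} (d z : α) (N M : Nat) (c0 : List α)
    (hlen : c0.length = N + 1) (g : Int → α) :
    pvTransposeB d
      (c0 :: (PySem.List.pyRange 1 ((M : Int) + 1) 1).map (fun j => g j :: List.replicate N z))
    = (PySem.List.pyGetD c0 0 d :: (PySem.List.pyRange 1 ((M : Int) + 1) 1).map g) ::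
        (PySem.List.pyRange 1 ((N : Int) + 1) 1).map
          (fun i => PySem.List.pyGetD c0 i d :: List.replicate M z) := by
  unfold pvTransposeB
  rw [PySem.List.pyGetD_zero_cons, hlen,
    show ((N + 1 : Nat) : Int) = (N : Int) + 1 by push_cast; ring]
  rw [PySem.List.pyRange_one_cons (by omega : (0 : Int) < (N : Int) + 1)]
  simp only [zero_add, List.map_cons]
  congr 1
  · simp only [List.map_map]
    congr 1
    refine List.map_congr_left ?_
    intro j _
    simp [PySem.List.pyGetD_zero_cons]
  · refine List.map_congr_left ?_
    intro i hi
    rw [PySem.List.mem_pyRange_one] at hi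
    simp only [List.map_map]
    congr 1
    have hcomp : ((fun col => PySem.List.pyGetD col i d) ∘ fun j => g j :: List.replicate N z)
        = fun (_ : Int) => z := by
      funext j
      exact pv_get_cons_replicate d (g j) z N i hi.1 hi.2
    rw [hcomp, List.map_const', PySem.List.length_pyRange_one,
      show (((M : Int) + 1 - 1).toNat) = M by omega]

-- transpose of B's score columns, with the first column a comprehension over i
lemma pv_transpose_comprehension {α : Type} (d z : α) (N M : Nat) (f : Int → α) (g : Int → α) :
    pvTransposeB d
      (((PySem.List.pyRange 0 ((N : Int) + 1) 1).map f) ::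
        (PySem.List.pyRange 1 ((M : Int) + 1) 1).map (fun j => g j :: List.replicate N z))
    = (f 0 :: (PySem.List.pyRange 1 ((M : Int) + 1) 1).map g) ::
        (PySem.List.pyRange 1 ((N : Int) + 1) 1).map (fun i => f i :: List.replicate M z) := by
  rw [pv_transpose_gen d z N M _ (by rw [List.length_map, PySem.List.length_pyRange_one]; omega) g]
  congr 1
  · congr 1
    exact PySem.List.pyGetD_map_pyRange_of_nonneg f ((N : Int) + 1) 0 d (le_refl 0) (by omega)
  · refine List.map_congr_left ?_
    intro i hi
    rw [PySem.List.mem_pyRange_one] at hi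
    rw [PySem.List.pyGetD_map_pyRange_of_nonneg f ((N : Int) + 1) i d (by omega) (by omega)]

-- transpose of B's traceback columns, all columns head-plus-padding
lemma pv_transpose_const {α : Type} (d a b c z : α) (N M : Nat) :
    pvTransposeB d
      ((a :: List.replicate N b) ::
        (PySem.List.pyRange 1 ((M : Int) + 1) 1).map (fun _ => c :: List.replicate N z))
    = (a :: (PySem.List.pyRange 1 ((M : Int) + 1) 1).map (fun _ => c)) ::
        (PySem.List.pyRange 1 ((N : Int) + 1) 1).map (fun _ => b :: List.replicate M z) := by
  rw [pv_transpose_gen d z N M _ (by simp) (fun _ => c)]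
  congr 1
  · rw [PySem.List.pyGetD_zero_cons]
  · refine List.map_congr_left ?_
    intro i hi
    rw [PySem.List.mem_pyRange_one] at hi
    rw [pv_get_cons_replicate d a b N i hi.1 hi.2]

-- B's whole computation equals the same explicit row form
lemma pv_alt (N M : Nat) (gap : Int) :
    (pvTransposeB (0 : Int)
       (((PySem.List.pyRange 0 ((N : Int) + 1) 1).map (fun i => i * gap)) ::
         (PySem.List.pyRange 1 ((M : Int) + 1) 1).map (fun j => j * gap :: List.replicate ((N : Int)).toNat 0)),
     pvTransposeB ("" : String)
       (("0" :: List.replicate ((N : Int)).toNat "U") ::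
         (PySem.List.pyRange 1 ((M : Int) + 1) 1).map (fun _ => "L" :: List.replicate ((N : Int)).toNat "")))
    =
    (((PySem.List.pyRange 0 ((M : Int) + 1) 1).map (fun j => j * gap)) ::
        (PySem.List.pyRange 1 ((N : Int) + 1) 1).map (fun i => i * gap :: List.replicate ((M : Int)).toNat 0),
      ("0" :: List.replicate ((M : Int)).toNat "L") ::
        (PySem.List.pyRange 1 ((N : Int) + 1) 1).map (fun _ => "U" :: List.replicate ((M : Int)).toNat "")) := by
  rw [show ((N : Int)).toNat = N from Int.toNat_natCast N, show ((M : Int)).toNat = M from Int.toNat_natCast M]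
  rw [pv_transpose_comprehension (0 : Int) 0 N M (fun i => i * gap) (fun j => j * gap)]
  rw [pv_transpose_const ("" : String) "0" "U" "L" "" N M]
  rw [PySem.List.pyRange_one_cons (by omega : (0 : Int) < (M : Int) + 1)]
  rw [List.map_cons]
  norm_num

-- ===== VERDICT (by name: the statement is the Claim_ definition above) =====
theorem initialize_matrices_spec : Claim_equal_initialize_matrices := by
  intro seq1 seq2 gap _
  unfold Spec_initialize_matrices initialize_matrices initialize_matrices_alt
  rw [PySem.Str.len_eq seq1, PySem.Str.len_eq seq2]
  rw [pv_main seq1.toList.length seq2.toList.length gap]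
  exact (pv_alt seq1.toList.length seq2.toList.length gap).symm
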